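-- pv_equiv track=rewrite | github.com/zurabiashvili/oddsportal-scraper | scraper.py | league_slug_from_url
-- ===== SOURCE A (Python) =====
-- def league_slug_from_url(url: str) -> str:
--     """Extract league-season slug for filename. Use league name when no season hyphen (e.g. eredivisie)."""
--     parts = url.rstrip("/").split("/")
--     for p in reversed(parts):
--         if p and p != "results" and "-" in p:
--             return p
--     # No season suffix (e.g. /eredivisie/results/) - use league name to avoid "unknown"
--     for p in reversed(parts):
--         if p and p not in ("results", "football", "soccer"):
--             return p
--     return "unknown"
-- ===== SOURCE B (Python) =====
-- def league_slug_from_url(url: str) -> str: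
--     """Extract league-season slug for filename. Use league name when no season hyphen (e.g. eredivisie)."""
--     parts = url.rstrip("/").split("/")
--     fallback = None
--     for p in reversed(parts):
--         if p and p != "results" and "-" in p:
--             return p
--         if fallback is None and p and p not in ("results", "football", "soccer"):
--             fallback = p
--     return fallback if fallback is not None else "unknown"
-- ===== Notes on version B (the rewrite author's own statement) =====
-- stated objective: simpler
-- what changed: Replaces A's two full reverse passes over the URL parts by a single reverse pass that returns immediately on a hyphenated part and records the first eligible fallback part in an Option accumulator.
import Mathlib
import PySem

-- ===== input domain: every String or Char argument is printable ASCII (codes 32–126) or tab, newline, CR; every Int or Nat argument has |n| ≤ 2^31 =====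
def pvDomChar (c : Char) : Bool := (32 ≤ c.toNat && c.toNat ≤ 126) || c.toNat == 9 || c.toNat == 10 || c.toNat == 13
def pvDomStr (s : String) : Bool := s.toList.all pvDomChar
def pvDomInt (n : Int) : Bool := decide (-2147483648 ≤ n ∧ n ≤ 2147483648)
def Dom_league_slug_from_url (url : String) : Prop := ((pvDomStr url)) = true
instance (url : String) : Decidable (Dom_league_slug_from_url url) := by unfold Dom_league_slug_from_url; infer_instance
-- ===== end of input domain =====

-- B merges A's two reverse passes into one reverse pass with an Option fallback accumulator (objective: simpler).

def predA (p : String) : Bool := p ≠ "" && p ≠ "results" && PySem.Str.isIn "-" p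
def predB (p : String) : Bool := p ≠ "" && p ≠ "results" && p ≠ "football" && p ≠ "soccer"

-- url.rstrip("/"): drop trailing '/' characters (hand port, exact: rstrip with an explicit
-- chars argument removes exactly the trailing characters from that set).
def pvRstripSlash (s : String) : String :=
  String.ofList ((s.toList.reverse.dropWhile (· == '/')).reverse)

-- url.rstrip("/").split("/"): split? is total for the non-empty separator "/" (getD unreachable).
def pvParts (url : String) : List String :=
  (PySem.Str.split? (pvRstripSlash url) "/").getD []

-- ===== PORT A =====
-- each 'for p in reversed(parts): if …: return p' is a first-match search on parts.reverse
def league_slug_from_url (url : String) : String :=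
  let parts := pvParts url
  match parts.reverse.find? predA with
  | some p => p
  | none =>
    match parts.reverse.find? predB with
    | some p => p
    | none => "unknown"

-- ===== PORT B =====
-- single reverse pass; early return on a hyphenated part, first eligible part kept as fallback
def leagueGoB : List String → Option String → String
  | [], fb => fb.getD "unknown"
  | p :: rest, fb =>
    if predA p then p
    else leagueGoB rest (if fb.isNone && predB p then some p else fb)

def league_slug_from_url_alt (url : String) : String :=
  leagueGoB (pvParts url).reverse none

-- ===== PRECONDITION & SPEC =====
def Spec_league_slug_from_url (url : String) (out : String) : Prop := out = league_slug_from_url_alt url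
instance (url : String) (out : String) : Decidable (Spec_league_slug_from_url url out) := by unfold Spec_league_slug_from_url; infer_instance

-- ===== CLAIM (what is proved, stated in full; the proofs are below) =====
def Claim_equal_league_slug_from_url : Prop := ∀ (url : String), Dom_league_slug_from_url url → Spec_league_slug_from_url url (league_slug_from_url url)

-- ===== LEMMAS AND PROOFS =====

-- loop invariant for B's single pass: an already-set fallback wins only if no hyphenated part remains
theorem leagueGoB_eq (l : List String) (fb : Option String) :
    leagueGoB l fb =
      match l.find? predA with
      | some p => p
      | none =>
        match fb with
        | some f => f
        | none =>
          match l.find? predB with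
          | some p => p
          | none => "unknown" := by
  induction l generalizing fb with
  | nil => cases fb <;> rfl
  | cons p rest ih =>
    cases h1 : predA p with
    | true => simp [leagueGoB, h1]
    | false =>
      simp only [leagueGoB, List.find?_cons, h1]
      rw [if_neg (by simp), ih]
      cases fb with
      | some f => simp
      | none =>
        cases h2 : predB p <;> simp

-- ===== VERDICT (by name: the statement is the Claim_ definition above) =====
theorem league_slug_from_url_spec : Claim_equal_league_slug_from_url := by
  intro url _
  unfold Spec_league_slug_from_url league_slug_from_url league_slug_from_url_alt
  rw [leagueGoB_eq]
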